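-- pv_equiv track=rewrite | github.com/RivanSoul/Combos-Filter | main.py | get_duplicates
-- ===== SOURCE A (Python) =====
-- def get_duplicates(lines):
--     """Return unique set of lines that appeared more than once."""
--     count = {}
--     for ln in lines:
--         ln = ln.rstrip('\r\n')
--         count[ln] = count.get(ln, 0) + 1
--     seen, out = set(), []
--     for ln in lines:
--         ln = ln.rstrip('\r\n')
--         if count[ln] > 1 and ln not in seen:
--             seen.add(ln)
--             out.append(ln)
--     return out
-- ===== SOURCE B (Python) =====
-- def get_duplicates(lines):
--     """Return unique set of lines that appeared more than once."""
--     stripped = [ln.rstrip('\r\n') for ln in lines]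
--     count = {}
--     for ln in stripped:
--         count[ln] = count.get(ln, 0) + 1
--     return [ln for ln, c in count.items() if c > 1]
-- ===== Notes on version B (the rewrite author's own statement) =====
-- stated objective: simpler
-- what changed: Drops A's second scan over lines and its separate 'seen' set: B builds one insertion-ordered count dict over the rstripped lines and emits the result by filtering the dict's items (count > 1), relying on dict insertion order for first-appearance order.
import Mathlib
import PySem

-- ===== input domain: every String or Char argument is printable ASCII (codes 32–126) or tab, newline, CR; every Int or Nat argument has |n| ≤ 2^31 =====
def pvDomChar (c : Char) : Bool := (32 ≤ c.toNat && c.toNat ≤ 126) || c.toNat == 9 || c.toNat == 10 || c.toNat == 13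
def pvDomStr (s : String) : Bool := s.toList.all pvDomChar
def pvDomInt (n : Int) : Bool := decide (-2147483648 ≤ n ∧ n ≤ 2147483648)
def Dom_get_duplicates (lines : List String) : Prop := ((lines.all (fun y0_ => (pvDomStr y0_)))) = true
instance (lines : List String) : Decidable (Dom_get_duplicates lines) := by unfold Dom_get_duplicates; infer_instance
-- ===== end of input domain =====

-- B replaces A's second scan over `lines` (with its separate `seen` set) by one filtering
-- pass over the items of the insertion-ordered count dict; objective: simpler.

-- shared helper: Python's s.rstrip('\r\n'), ported by hand (exact: drops trailing '\r'/'\n' chars)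
def pvIsCRLF (c : Char) : Bool := c == '\r' || c == '\n'
def rstripCRLF (s : String) : String := String.ofList ((s.toList.reverse.dropWhile pvIsCRLF).reverse)

-- ===== PORT A =====
def get_duplicates (lines : List String) : List String :=
  let count : PySem.Dict String Int :=
    lines.foldl (fun d ln =>
      let ln := rstripCRLF ln
      d.insert ln (d.getD ln 0 + 1)) PySem.Dict.empty
  let st :=
    lines.foldl (fun (st : PySem.Set String × List String) ln =>
      let ln := rstripCRLF ln
      if decide (1 < count.getD ln 0) && !(PySem.Set.contains st.1 ln) then
        (PySem.Set.add st.1 ln, st.2 ++ [ln])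
      else st) (PySem.Set.empty, [])
  st.2

-- ===== PORT B =====
def get_duplicates_alt (lines : List String) : List String :=
  let stripped := lines.map rstripCRLF
  let count : PySem.Dict String Int :=
    stripped.foldl (fun d ln => d.insert ln (d.getD ln 0 + 1)) PySem.Dict.empty
  (count.items.filter (fun p => decide (1 < p.2))).map (·.1)

-- ===== PRECONDITION & SPEC =====
def Spec_get_duplicates (lines : List String) (out : List String) : Prop := out = get_duplicates_alt lines
instance (lines : List String) (out : List String) : Decidable (Spec_get_duplicates lines out) := by unfold Spec_get_duplicates; infer_instance

-- ===== CLAIM (what is proved, stated in full; the proofs are below) =====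
def Claim_equal_get_duplicates : Prop := ∀ (lines : List String), Dom_get_duplicates lines → Spec_get_duplicates lines (get_duplicates lines)

-- ===== LEMMAS AND PROOFS =====

-- A's second loop, with the per-line test abstracted as `c`, collects the first
-- occurrences (not already in `seen`) of the elements of S that satisfy `c`.
theorem loopA_eq (c : String → Bool) (S : List String)
    (seen : PySem.Set String) (out : List String) :
    (S.foldl (fun (st : PySem.Set String × List String) x =>
        if c x && !(PySem.Set.contains st.1 x) then
          (PySem.Set.add st.1 x, st.2 ++ [x])
        else st) (seen, out)).2
      = out ++ (PySem.Set.ofList S).filter (fun x => c x && !(PySem.Set.contains seen x)) := by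
  induction S generalizing seen out with
  | nil => simp [PySem.Set.ofList]
  | cons x S ih =>
    simp only [List.foldl_cons]
    rw [PySem.Set.ofList_cons, List.filter_cons]
    by_cases hx : (c x && !(PySem.Set.contains seen x)) = true
    · have hx' := hx
      simp only [Bool.and_eq_true, Bool.not_eq_true', PySem.Set.contains_eq_listContains,
        List.contains_eq_mem, decide_eq_false_iff_not] at hx'
      have hmem : x ∉ seen := hx'.2
      rw [if_pos hx, if_pos hx, ih]
      rw [List.append_assoc, List.singleton_append]
      congr 2
      simp only [PySem.Set.discard, List.filter_filter]
      apply List.filter_congr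
      intro y hy
      clear ih hy
      rw [PySem.Set.add_of_not_mem hmem]
      by_cases h3 : y = x
      · subst h3
        simp [hmem]
      · by_cases h2 : y ∈ seen <;> simp [h3, h2]
    · have hx' := hx
      simp only [Bool.and_eq_true, Bool.not_eq_true', PySem.Set.contains_eq_listContains,
        List.contains_eq_mem, decide_eq_false_iff_not, not_and, not_not] at hx'
      rw [if_neg hx, if_neg hx, ih]
      congr 1
      simp only [PySem.Set.discard, List.filter_filter]
      apply List.filter_congr
      intro y hy
      clear ih hy
      by_cases h3 : y = x
      · subst h3
        cases hcy : c y with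
        | false => simp
        | true => simp [hx' hcy]
      · simp [h3]

theorem get_duplicates_spec : Claim_equal_get_duplicates := by
  intro lines _
  unfold Spec_get_duplicates get_duplicates get_duplicates_alt
  simp only []
  rw [List.foldl_map]
  set C := List.foldl (fun (d : PySem.Dict String Int) ln =>
    d.insert (rstripCRLF ln) (d.getD (rstripCRLF ln) 0 + 1)) PySem.Dict.empty lines with hC
  have hCc : C = PySem.Dict.counter (lines.map rstripCRLF) := by
    rw [hC, ← PySem.Dict.foldl_insert_getD_add_one_eq_counter, List.foldl_map]
  rw [← List.foldl_map (f := rstripCRLF)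
    (g := fun (st : PySem.Set String × List String) x =>
      if decide (1 < C.getD x 0) && !(PySem.Set.contains st.1 x) then
        (PySem.Set.add st.1 x, st.2 ++ [x])
      else st)]
  rw [loopA_eq]
  rw [hCc, PySem.Dict.items_counter, List.filter_map, List.map_map]
  simp [Function.comp_def, PySem.Dict.getD_counter, Nat.one_lt_cast]
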